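-- pv_equiv track=rewrite | github.com/ethannsie/xmlMusicGen | musicAuth.py | parse_chord
-- ===== SOURCE A (Python) =====
-- def parse_chord(chord_str):
--     notes = []
--     buf = ""
--     for char in chord_str:
--         buf += char
--         if len(buf) == 2 or (len(buf) == 3 and buf[1] in "#b"):
--             notes.append(buf)
--             buf = ""
--     return notes
-- ===== SOURCE B (Python) =====
-- def parse_chord(chord_str):
--     # Pair consecutive characters: the length-3 branch in A is unreachable
--     # (the buffer is always flushed at length 2), so the chord string is
--     # just consecutive 2-char chunks; a trailing odd char is dropped.
--     it = iter(chord_str)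
--     return [a + b for a, b in zip(it, it)]
-- ===== Notes on version B (the rewrite author's own statement) =====
-- stated objective: simpler
-- what changed: A's incremental buffer with a dead length-3 accidental branch is replaced by direct pairing of consecutive characters (zip of the same iterator), since A always flushes at length 2.
import Mathlib
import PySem

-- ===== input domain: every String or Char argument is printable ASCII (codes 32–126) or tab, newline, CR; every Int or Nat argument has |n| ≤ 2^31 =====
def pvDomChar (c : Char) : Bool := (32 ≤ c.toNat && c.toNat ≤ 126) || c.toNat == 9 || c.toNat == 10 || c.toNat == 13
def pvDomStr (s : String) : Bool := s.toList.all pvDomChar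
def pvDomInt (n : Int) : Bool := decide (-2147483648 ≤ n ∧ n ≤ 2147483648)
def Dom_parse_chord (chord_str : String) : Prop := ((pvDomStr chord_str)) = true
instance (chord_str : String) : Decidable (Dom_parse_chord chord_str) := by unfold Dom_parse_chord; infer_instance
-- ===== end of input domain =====

-- B replaces A's char-by-char buffer (with its unreachable length-3 branch) by direct pairing of consecutive characters; objective: simpler.
-- ===== PORT A =====
-- A: fold over the characters maintaining (notes, buf); buf is the Python string kept as List Char.
-- stepA is the loop body of A, verbatim.
def stepA (st : List String × List Char) (c : Char) : List String × List Char :=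
  let buf := st.2 ++ [c]
  if buf.length = 2 ∨ (buf.length = 3 ∧ (buf[1]? = some '#' ∨ buf[1]? = some 'b')) then
    (st.1 ++ [String.ofList buf], ([] : List Char))
  else
    (st.1, buf)

def parse_chord (chord_str : String) : List String :=
  (chord_str.toList.foldl stepA ([], [])).1

-- ===== PORT B =====
-- B: zip the iterator with itself = pair consecutive characters, dropping a trailing odd one.
def pairChunks : List Char → List String
  | a :: b :: rest => String.ofList [a, b] :: pairChunks rest
  | _ => []

def parse_chord_alt (chord_str : String) : List String :=
  pairChunks chord_str.toList

-- ===== PRECONDITION & SPEC =====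
def Spec_parse_chord (chord_str : String) (out : List String) : Prop := out = parse_chord_alt chord_str
instance (chord_str : String) (out : List String) : Decidable (Spec_parse_chord chord_str out) := by unfold Spec_parse_chord; infer_instance

-- ===== CLAIM (what is proved, stated in full; the proofs are below) =====
def Claim_equal_parse_chord : Prop := ∀ (chord_str : String), Dom_parse_chord chord_str → Spec_parse_chord chord_str (parse_chord chord_str)

-- ===== LEMMAS AND PROOFS =====

-- ===== VERDICT (by name: the statement is the Claim_ definition above) =====
theorem stepA_empty (acc : List String) (c : Char) : stepA (acc, []) c = (acc, [c]) := by
  simp [stepA]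

theorem stepA_one (acc : List String) (a b : Char) :
    stepA (acc, [a]) b = (acc ++ [String.ofList [a, b]], []) := by
  simp [stepA]

theorem foldA_pairChunks (l : List Char) : ∀ (acc : List String),
    (l.foldl stepA (acc, [])).1 = acc ++ pairChunks l := by
  induction l using pairChunks.induct with
  | case1 a b rest ih =>
      intro acc
      rw [List.foldl_cons, List.foldl_cons, stepA_empty, stepA_one, ih]
      simp [pairChunks]
  | case2 l h =>
      intro acc
      cases l with
      | nil => simp [pairChunks]
      | cons x t =>
        cases t with
        | nil => simp [List.foldl_cons, stepA_empty, pairChunks]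
        | cons y t' => exact absurd rfl (h x y t')

theorem parse_chord_spec : Claim_equal_parse_chord := by
  intro s _
  unfold Spec_parse_chord parse_chord parse_chord_alt
  exact (foldA_pairChunks s.toList []).trans (List.nil_append _)
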